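-- pv_equiv track=rewrite | github.com/inaseri/sandogh | client/views.py | findSeqChar
-- ===== SOURCE A (Python) =====
-- def findSeqChar(CharLocs, src):
--     AllSeqChars = []
--     i = 0
--     SeqChars = []
--     while i < len(CharLocs) - 1:
--         if CharLocs[i + 1] - CharLocs[i] == 1 and \
--                ord(src[CharLocs[i+1]]) - ord(src[CharLocs[i]]) == 1:
--             # We find a pair of sequential chars!
--             if not SeqChars:
--                 SeqChars = [src[CharLocs[i]], src[CharLocs[i+1]]]
--             else:
--                 SeqChars.append(src[CharLocs[i+1]])
--         else:
--             if SeqChars: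
--                 AllSeqChars.append(SeqChars)
--                 SeqChars = []
--         i += 1
--     if SeqChars:
--         AllSeqChars.append(SeqChars)
--     return AllSeqChars
-- ===== SOURCE B (Python) =====
-- def findSeqChar(CharLocs, src):
--     # Precompute for each adjacent pair whether it is a "sequential" pair,
--     # then collect maximal runs of True with a two-pointer scan.
--     flags = [CharLocs[i + 1] - CharLocs[i] == 1 and
--              ord(src[CharLocs[i + 1]]) - ord(src[CharLocs[i]]) == 1
--              for i in range(len(CharLocs) - 1)]
--     out = []
--     n = len(flags)
--     i = 0
--     while i < n:
--         if flags[i]: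
--             j = i
--             while j < n and flags[j]:
--                 j += 1
--             out.append([src[CharLocs[k]] for k in range(i, j + 1)])
--             i = j
--         else:
--             i += 1
--     return out
-- ===== Notes on version B (the rewrite author's own statement) =====
-- stated objective: alternative
-- what changed: B first precomputes a boolean table flags[i] marking sequential adjacent pairs, then collects maximal True runs with a two-pointer scan and builds each output group by an index-range comprehension, instead of A's single stateful pass with a growing SeqChars accumulator.
import Mathlib
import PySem

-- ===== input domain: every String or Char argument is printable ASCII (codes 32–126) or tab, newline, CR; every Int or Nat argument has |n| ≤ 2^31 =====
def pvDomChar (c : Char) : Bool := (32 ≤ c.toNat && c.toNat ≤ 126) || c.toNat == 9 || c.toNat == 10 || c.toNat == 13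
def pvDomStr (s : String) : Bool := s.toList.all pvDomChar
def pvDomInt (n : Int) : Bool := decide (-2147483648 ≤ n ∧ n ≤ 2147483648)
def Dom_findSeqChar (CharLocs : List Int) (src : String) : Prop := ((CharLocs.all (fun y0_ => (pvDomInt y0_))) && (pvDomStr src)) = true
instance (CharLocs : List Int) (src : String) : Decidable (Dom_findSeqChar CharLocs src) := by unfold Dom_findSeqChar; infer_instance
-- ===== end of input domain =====

-- B replaces A's single stateful accumulator pass by a precomputed boolean pair table
-- plus a two-pointer run-collection scan (objective: alternative decomposition, same cost).

-- ===== PORT A =====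
-- shared rendering of the Python expressions `ord(src[n])` and `src[n]`
-- (under Pre_ the index is always in range, so the `getD ' '` default is never taken)
def pvOrdAt (src : String) (n : Int) : Int := (((PySem.Str.pyGet? src n).getD ' ').toNat : Int)
def pvChAt (src : String) (n : Int) : String := String.ofList [(PySem.Str.pyGet? src n).getD ' ']
-- the pair condition `CharLocs[i+1]-CharLocs[i]==1 and ord(src[CharLocs[i+1]])-ord(src[CharLocs[i]])==1`
def pvPairSeq (CharLocs : List Int) (src : String) (i : Nat) : Bool :=
  decide (CharLocs.getD (i+1) 0 - CharLocs.getD i 0 = 1) &&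
  decide (pvOrdAt src (CharLocs.getD (i+1) 0) - pvOrdAt src (CharLocs.getD i 0) = 1)

-- A's while loop: state = (i, AllSeqChars, SeqChars)
def findSeqCharGo (CharLocs : List Int) (src : String) (i : Nat)
    (all : List (List String)) (seq : List String) : List (List String) :=
  if _h : i + 1 < CharLocs.length then
    if pvPairSeq CharLocs src i then
      if seq = [] then
        findSeqCharGo CharLocs src (i+1) all
          [pvChAt src (CharLocs.getD i 0), pvChAt src (CharLocs.getD (i+1) 0)]
      else
        findSeqCharGo CharLocs src (i+1) all (seq ++ [pvChAt src (CharLocs.getD (i+1) 0)])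
    else
      if seq = [] then findSeqCharGo CharLocs src (i+1) all seq
      else findSeqCharGo CharLocs src (i+1) (all ++ [seq]) []
  else
    if seq = [] then all else all ++ [seq]
termination_by CharLocs.length - i

def findSeqChar (CharLocs : List Int) (src : String) : List (List String) :=
  findSeqCharGo CharLocs src 0 [] []

-- ===== PORT B =====
-- flags[i] = is pair i sequential?  (B's list comprehension)
def pvFlags (CharLocs : List Int) (src : String) : List Bool :=
  (List.range (CharLocs.length - 1)).map (fun i => pvPairSeq CharLocs src i)

-- B's inner `while j < n and flags[j]: j += 1`
def pvRunEnd (flags : List Bool) (j : Nat) : Nat :=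
  if _h : j < flags.length ∧ flags.getD j false = true then pvRunEnd flags (j+1) else j
termination_by flags.length - j
decreasing_by omega

theorem pvRunEnd_ge (flags : List Bool) (j : Nat) : j ≤ pvRunEnd flags j := by
  fun_induction pvRunEnd flags j <;> omega

theorem pvRunEnd_gt (flags : List Bool) (j : Nat)
    (h1 : j < flags.length) (h2 : flags.getD j false = true) : j < pvRunEnd flags j := by
  rw [pvRunEnd, dif_pos ⟨h1, h2⟩]
  have := pvRunEnd_ge flags (j+1); omega

-- B's outer two-pointer scan
def findSeqCharAltGo (CharLocs : List Int) (src : String) (flags : List Bool) (i : Nat) :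
    List (List String) :=
  if h : i < flags.length then
    if hf : flags.getD i false = true then
      let j := pvRunEnd flags i
      ((List.range (j + 1 - i)).map (fun k => pvChAt src (CharLocs.getD (i + k) 0)))
        :: findSeqCharAltGo CharLocs src flags j
    else findSeqCharAltGo CharLocs src flags (i+1)
  else []
termination_by flags.length - i
decreasing_by
  · have := pvRunEnd_gt flags i h hf; omega
  · omega

def findSeqChar_alt (CharLocs : List Int) (src : String) : List (List String) :=
  findSeqCharAltGo CharLocs src (pvFlags CharLocs src) 0

-- ===== PRECONDITION & SPEC =====
-- Pre_ excludes exactly the inputs where Python A raises IndexError: a pair of adjacent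
-- CharLocs with difference 1 whose locations are not valid indices into src.
def Pre_findSeqChar (CharLocs : List Int) (src : String) : Prop :=
  ∀ i ∈ List.range (CharLocs.length - 1),
    CharLocs.getD (i+1) 0 - CharLocs.getD i 0 = 1 →
      (PySem.Str.pyGet? src (CharLocs.getD (i+1) 0)).isSome = true ∧
      (PySem.Str.pyGet? src (CharLocs.getD i 0)).isSome = true

instance (CharLocs : List Int) (src : String) : Decidable (Pre_findSeqChar CharLocs src) := by
  unfold Pre_findSeqChar; infer_instance

def pvWitness_findSeqChar : List Int × String := ([0, 1, 2, 4], "abcdef")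

def Spec_findSeqChar (CharLocs : List Int) (src : String) (out : List (List String)) : Prop := out = findSeqChar_alt CharLocs src
instance (CharLocs : List Int) (src : String) (out : List (List String)) : Decidable (Spec_findSeqChar CharLocs src out) := by unfold Spec_findSeqChar; infer_instance

-- ===== CLAIM (what is proved, stated in full; the proofs are below) =====
def Claim_equal_findSeqChar : Prop := ∀ (CharLocs : List Int) (src : String), Dom_findSeqChar CharLocs src → Pre_findSeqChar CharLocs src → Spec_findSeqChar CharLocs src (findSeqChar CharLocs src)

-- ===== LEMMAS AND PROOFS =====

theorem pvFlags_length (C : List Int) (s : String) : (pvFlags C s).length = C.length - 1 := by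
  simp [pvFlags]

theorem pvFlags_getD (C : List Int) (s : String) (i : Nat) (h : i < C.length - 1) :
    (pvFlags C s).getD i false = pvPairSeq C s i := by
  simp [pvFlags, List.getD, h]

theorem pvRunEnd_stop (flags : List Bool) (j : Nat) :
    ¬ (pvRunEnd flags j < flags.length ∧ flags.getD (pvRunEnd flags j) false = true) := by
  fun_induction pvRunEnd flags j with
  | case1 j h ih => exact ih
  | case2 j h => exact h

theorem pvRunEnd_true (flags : List Bool) (j : Nat)
    (h1 : j < flags.length) (h2 : flags.getD j false = true) :
    pvRunEnd flags j = pvRunEnd flags (j+1) := by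
  rw [pvRunEnd, dif_pos ⟨h1, h2⟩]

theorem pvRunEnd_false (flags : List Bool) (j : Nat)
    (h : ¬ (j < flags.length ∧ flags.getD j false = true)) : pvRunEnd flags j = j := by
  rw [pvRunEnd, dif_neg h]

theorem altGo_nil (C : List Int) (s : String) (flags : List Bool) (i : Nat)
    (h : flags.length ≤ i) : findSeqCharAltGo C s flags i = [] := by
  rw [findSeqCharAltGo, dif_neg (by omega)]

theorem altGo_skip (C : List Int) (s : String) (flags : List Bool) (j : Nat)
    (h : ¬ (j < flags.length ∧ flags.getD j false = true)) :
    findSeqCharAltGo C s flags j = findSeqCharAltGo C s flags (j+1) := by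
  by_cases hj : j < flags.length
  · have hf : ¬ flags.getD j false = true := fun hf => h ⟨hj, hf⟩
    rw [findSeqCharAltGo, dif_pos hj, dif_neg hf]
  · rw [altGo_nil C s flags j (by omega), altGo_nil C s flags (j+1) (by omega)]

theorem range_map_shift1 {α : Type} (f : Nat → α) (m : Nat) :
    (List.range (m+1)).map f = f 0 :: (List.range m).map (fun k => f (k+1)) := by
  rw [List.range_succ_eq_map]
  simp [List.map_map, Function.comp]

theorem range_map_shift2 {α : Type} (f : Nat → α) (m : Nat) :
    (List.range (m+2)).map f = f 0 :: f 1 :: (List.range m).map (fun k => f (k+2)) := by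
  rw [range_map_shift1, range_map_shift1]

theorem altGo_run (C : List Int) (s : String) (flags : List Bool) (i : Nat)
    (h : i < flags.length) (hf : flags.getD i false = true) :
    findSeqCharAltGo C s flags i =
      ((List.range (pvRunEnd flags i + 1 - i)).map (fun k => pvChAt s (C.getD (i + k) 0)))
        :: findSeqCharAltGo C s flags (pvRunEnd flags i) := by
  rw [findSeqCharAltGo, dif_pos h, dif_pos hf]

theorem pvMainStop (C : List Int) (s : String) (i : Nat) (hi : C.length ≤ i + 1) :
    (∀ all, findSeqCharGo C s i all [] =
        all ++ findSeqCharAltGo C s (pvFlags C s) i) ∧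
    (∀ all seq, seq ≠ [] → findSeqCharGo C s i all seq =
        all ++ (seq ++ (List.range (pvRunEnd (pvFlags C s) i - i)).map
            (fun k => pvChAt s (C.getD (i+1+k) 0)))
          :: findSeqCharAltGo C s (pvFlags C s) (pvRunEnd (pvFlags C s) i + 1)) := by
  have hF : (pvFlags C s).length ≤ i := by rw [pvFlags_length]; omega
  have hE : pvRunEnd (pvFlags C s) i = i :=
    pvRunEnd_false _ i (by intro h; omega)
  constructor
  · intro all
    rw [findSeqCharGo, dif_neg (by omega), if_pos rfl, altGo_nil C s _ i hF]
    simp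
  · intro all seq hseq
    rw [findSeqCharGo, dif_neg (by omega), if_neg hseq, hE,
        altGo_nil C s _ (i+1) (by omega)]
    simp


-- main invariant: A's loop from state (i, all, seq) vs B's scan from i
theorem pvMain (C : List Int) (s : String) : ∀ (d i : Nat), C.length - i ≤ d →
    (∀ all, findSeqCharGo C s i all [] =
        all ++ findSeqCharAltGo C s (pvFlags C s) i) ∧
    (∀ all seq, seq ≠ [] → findSeqCharGo C s i all seq =
        all ++ (seq ++ (List.range (pvRunEnd (pvFlags C s) i - i)).map
            (fun k => pvChAt s (C.getD (i+1+k) 0)))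
          :: findSeqCharAltGo C s (pvFlags C s) (pvRunEnd (pvFlags C s) i + 1)) := by
  intro d
  induction d with
  | zero => intro i hi; exact pvMainStop C s i (by omega)
  | succ d ih =>
    intro i hi
    by_cases hlt : i + 1 < C.length
    · have hiF : i < (pvFlags C s).length := by rw [pvFlags_length]; omega
      obtain ⟨ihA, ihB⟩ := ih (i+1) (by omega)
      by_cases hp : pvPairSeq C s i = true
      · have hfi : (pvFlags C s).getD i false = true := by
          rw [pvFlags_getD C s i (by omega)]; simpa
        have hE : pvRunEnd (pvFlags C s) i = pvRunEnd (pvFlags C s) (i+1) :=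
          pvRunEnd_true _ i hiF hfi
        have hge : i + 1 ≤ pvRunEnd (pvFlags C s) (i+1) := pvRunEnd_ge _ _
        have hskip : findSeqCharAltGo C s (pvFlags C s) (pvRunEnd (pvFlags C s) i)
            = findSeqCharAltGo C s (pvFlags C s) (pvRunEnd (pvFlags C s) i + 1) :=
          altGo_skip C s _ _ (pvRunEnd_stop _ i)
        constructor
        · intro all
          rw [findSeqCharGo, dif_pos hlt, if_pos hp, if_pos rfl,
              ihB all _ (by simp), altGo_run C s _ i hiF hfi, hskip, hE]
          congr 2
          have hm : pvRunEnd (pvFlags C s) (i+1) + 1 - i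
              = (pvRunEnd (pvFlags C s) (i+1) - (i+1)) + 2 := by omega
          rw [hm, range_map_shift2]
          simp only [List.cons_append, List.nil_append, Nat.add_zero]
          exact congrArg (fun t => pvChAt s (C.getD i 0) :: pvChAt s (C.getD (i+1) 0) :: t)
            (List.map_congr_left fun k _ => by
              rw [show i + 1 + 1 + k = i + (k + 2) from by omega])
        · intro all seq hseq
          rw [findSeqCharGo, dif_pos hlt, if_pos hp, if_neg hseq,
              ihB all _ (by simp), hE]
          congr 2
          have hm : pvRunEnd (pvFlags C s) (i+1) - i
              = (pvRunEnd (pvFlags C s) (i+1) - (i+1)) + 1 := by omega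
          rw [hm, range_map_shift1, List.append_assoc]
          simp only [List.cons_append, Nat.add_zero]
          exact congrArg (fun t => seq ++ (pvChAt s (C.getD (i+1) 0) :: t))
            (List.map_congr_left fun k _ => by
              rw [show i + 1 + 1 + k = i + 1 + (k + 1) from by omega])
      · have hfi : (pvFlags C s).getD i false = false := by
          rw [pvFlags_getD C s i (by omega)]; simpa using hp
        have hstop0 : ¬ (i < (pvFlags C s).length ∧ (pvFlags C s).getD i false = true) := by
          intro h
          simp only [List.getD_eq_getElem?_getD] at hfi
          simp [hfi] at h
        have hE0 : pvRunEnd (pvFlags C s) i = i := pvRunEnd_false _ i hstop0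
        constructor
        · intro all
          rw [findSeqCharGo, dif_pos hlt, if_neg hp, if_pos rfl, ihA all,
              altGo_skip C s _ i hstop0]
        · intro all seq hseq
          rw [findSeqCharGo, dif_pos hlt, if_neg hp, if_neg hseq, ihA (all ++ [seq]), hE0]
          simp
    · exact pvMainStop C s i (by omega)

-- ===== VERDICT (by name: the statement is the Claim_ definition above) =====
theorem findSeqChar_spec : Claim_equal_findSeqChar := by
  intro C s _ _
  unfold Spec_findSeqChar findSeqChar findSeqChar_alt
  simpa using (pvMain C s C.length 0 (by omega)).1 []
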